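-- pv_equiv track=rewrite | github.com/strikersps/Competitive-Programming | Hacker-Rank/One-Zero/one_zero.py | compute_max_binary_number
-- ===== SOURCE A (Python) =====
-- MOD = 10**9 + 7
--
-- def compute_max_binary_number(binary_string, n):
--     updated_binary_string = 2 * binary_string[0: ]
--     i = n - 1
--     pos = n
--     while i >= 0:
--         if updated_binary_string[i: i + n] > updated_binary_string[pos: pos + n]:
--             pos = i
--         i -= 1
--
--     # Compute the decimal equivalent of the binary_string[pos: pos + n]
--     decimal_equivalent = 0
--     for bit in updated_binary_string[pos: pos + n]:
--         decimal_equivalent = ((decimal_equivalent << 1) + (ord(bit) - ord('0'))) % MOD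
--     return decimal_equivalent
-- ===== SOURCE B (Python) =====
-- MOD = 10**9 + 7
--
-- def compute_max_binary_number(binary_string, n):
--     if n <= 0:
--         return 0
--     doubled = binary_string + binary_string
--     limit = len(doubled)
--     # Find the lexicographically largest window doubled[i:i+n] (0 <= i <= n) by
--     # candidate elimination: refine the set of start positions one character
--     # column at a time, keeping only those that carry the largest character.
--     cands = list(range(n + 1))
--     for k in range(n):
--         alive = [i for i in cands if i + k < limit]
--         if not alive:
--             break
--         top = max(doubled[i + k] for i in alive)
--         cands = [i for i in alive if doubled[i + k] == top]
--     best = doubled[cands[0]:cands[0] + n]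
--     value = 0
--     for bit in best:
--         value = (value * 2 + ord(bit) - 48) % MOD
--     return value
-- ===== Notes on version B (the rewrite author's own statement) =====
-- stated objective: alternative
-- what changed: A picks the best window by comparing whole candidate slices pairwise in a downward scan; B instead refines the set of candidate start positions one character column at a time (Booth-style candidate elimination), never comparing two windows, then converts the single surviving window with one Horner pass.
import Mathlib
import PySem

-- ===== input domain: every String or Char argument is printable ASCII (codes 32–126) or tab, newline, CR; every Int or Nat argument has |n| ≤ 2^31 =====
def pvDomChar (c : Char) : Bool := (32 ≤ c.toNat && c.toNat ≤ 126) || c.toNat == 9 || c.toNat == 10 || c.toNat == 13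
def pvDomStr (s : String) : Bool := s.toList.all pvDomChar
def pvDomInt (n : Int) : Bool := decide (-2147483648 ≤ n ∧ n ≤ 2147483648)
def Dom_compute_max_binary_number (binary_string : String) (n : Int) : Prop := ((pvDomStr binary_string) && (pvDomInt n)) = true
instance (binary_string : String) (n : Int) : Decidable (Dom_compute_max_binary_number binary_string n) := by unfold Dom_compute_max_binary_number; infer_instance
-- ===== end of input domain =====

-- B finds the best window by Booth-style candidate elimination (refining the set of start
-- positions one character column at a time) instead of A's pairwise comparisons of O(n)
-- window slices; a structurally different algorithm, no speed claim.

-- ===== PORT A =====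
def pvMOD : Int := 10 ^ 9 + 7   -- MOD = 10**9 + 7

-- the 'while i >= 0' loop of A, state (i, pos)
def pvLoopA (u : List Char) (nn : Int) (i pos : Int) : Int :=
  if h : 0 ≤ i then
    if PySem.List.slice u (some i) (some (i + nn)) > PySem.List.slice u (some pos) (some (pos + nn))
    then pvLoopA u nn (i - 1) i
    else pvLoopA u nn (i - 1) pos
  else pos
termination_by (i + 1).toNat
decreasing_by all_goals omega

def compute_max_binary_number (binary_string : String) (n : Int) : Int :=
  -- updated_binary_string = 2 * binary_string[0:]
  let updated := PySem.List.slice binary_string.toList (some 0) none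
                 ++ PySem.List.slice binary_string.toList (some 0) none
  let pos := pvLoopA updated n (n - 1) n
  (PySem.List.slice updated (some pos) (some (pos + n))).foldl
    (fun d bit => PySem.Int.mod ((d <<< (1 : Nat)) + ((bit.toNat : Int) - ('0'.toNat : Int))) pvMOD) 0

-- ===== PORT B =====
-- doubled[i + k]; the callers guard 0 ≤ i, 0 ≤ k and i + k < len(doubled), so the
-- default is never used and the access is exact
def pvChar (u : List Char) (i k : Int) : Char := (PySem.List.pyGet? u (i + k)).getD ' '

-- the 'for k in range(n)' refinement loop of B (fuel = number of rounds left, i.e. n - k)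
def pvRefine (u : List Char) (limit : Int) : Nat → Int → List Int → List Int
  | 0, _, cands => cands
  | fuel + 1, k, cands =>
      let alive := cands.filter (fun i => decide (i + k < limit))
      if alive.isEmpty then cands
      else
        let top := (PySem.List.max? (alive.map (fun i => pvChar u i k)) (fun c => c)).getD ' '
        pvRefine u limit fuel (k + 1) (alive.filter (fun i => pvChar u i k == top))

def compute_max_binary_number_alt (binary_string : String) (n : Int) : Int :=
  if n ≤ 0 then 0
  else
    let doubled := binary_string.toList ++ binary_string.toList
    let cands := PySem.List.pyRange 0 (n + 1) 1
    let final := pvRefine doubled (doubled.length : Int) n.toNat 0 cands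
    let c0 := final.headD 0
    let best := PySem.List.slice doubled (some c0) (some (c0 + n))
    best.foldl (fun v bit => PySem.Int.mod (v * 2 + (bit.toNat : Int) - 48) pvMOD) 0

-- ===== PRECONDITION & SPEC =====
def Spec_compute_max_binary_number (binary_string : String) (n : Int) (out : Int) : Prop := out = compute_max_binary_number_alt binary_string n
instance (binary_string : String) (n : Int) (out : Int) : Decidable (Spec_compute_max_binary_number binary_string n out) := by unfold Spec_compute_max_binary_number; infer_instance

-- ===== CLAIM (what is proved, stated in full; the proofs are below) =====
def Claim_equal_compute_max_binary_number : Prop := ∀ (binary_string : String) (n : Int), Dom_compute_max_binary_number binary_string n → Spec_compute_max_binary_number binary_string n (compute_max_binary_number binary_string n)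

-- ===== LEMMAS AND PROOFS =====

-- the window u[j : j+n]
def pvWnd (u : List Char) (nn j : Int) : List Char :=
  PySem.List.slice u (some j) (some (j + nn))

lemma pvWnd_eq (u : List Char) (nn j : Int) (hn : 0 ≤ nn) (hj : 0 ≤ j) :
    pvWnd u nn j = (u.drop j.toNat).take nn.toNat := by
  unfold pvWnd
  rw [PySem.List.slice_toNat u hj (show (0:Int) ≤ j + nn by omega)]
  congr 1
  omega

lemma pvWnd_len (u : List Char) (nn j : Int) (hn : 0 ≤ nn) (hj : 0 ≤ j) :
    (pvWnd u nn j).length = min nn.toNat (u.length - j.toNat) := by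
  rw [pvWnd_eq u nn j hn hj]
  simp

lemma pvWnd_get (u : List Char) (nn j : Int) (hn : 0 ≤ nn) (hj : 0 ≤ j) (k : Nat)
    (hk : k < (pvWnd u nn j).length) (hu : j.toNat + k < u.length) :
    (pvWnd u nn j)[k]'hk = u[j.toNat + k]'hu := by
  rw [List.getElem_of_eq (pvWnd_eq u nn j hn hj) hk, List.getElem_take, List.getElem_drop]

-- lexicographic facts about List Char
lemma pvLex_prefix : ∀ (k : Nat) (b : List Char), k < b.length → b.take k < b := by
  intro k
  induction k with
  | zero =>
      intro b hb
      cases b with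
      | nil => simp at hb
      | cons y t => simp
  | succ k ih =>
      intro b hb
      cases b with
      | nil => simp at hb
      | cons y t =>
          simp only [List.take_succ_cons]
          exact List.cons_lt_cons_iff.mpr (Or.inr ⟨rfl, ih t (by simpa using hb)⟩)

lemma pvLex_get : ∀ (k : Nat) (a b : List Char), a.take k = b.take k →
    ∀ (ha : k < a.length) (hb : k < b.length), a[k]'ha < b[k]'hb → a < b := by
  intro k
  induction k with
  | zero =>
      intro a b _ ha hb hlt
      cases a with
      | nil => simp at ha
      | cons x a' =>
          cases b with
          | nil => simp at hb
          | cons y b' =>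
              simp only [List.getElem_cons_zero] at hlt
              exact List.cons_lt_cons_iff.mpr (Or.inl hlt)
  | succ k ih =>
      intro a b htake ha hb hlt
      cases a with
      | nil => simp at ha
      | cons x a' =>
          cases b with
          | nil => simp at hb
          | cons y b' =>
              simp only [List.take_succ_cons, List.cons.injEq] at htake
              simp only [List.getElem_cons_succ] at hlt
              exact List.cons_lt_cons_iff.mpr
                (Or.inr ⟨htake.1, ih a' b' htake.2 (by simpa using ha) (by simpa using hb) hlt⟩)

-- the while loop of A returns an index in [0, nn] whose window dominates every window
lemma pvLoopA_spec (u : List Char) (nn : Int) :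
    ∀ (k : Nat) (i pos : Int), (i + 1).toNat ≤ k → i < pos → 0 ≤ pos → pos ≤ nn →
    (∀ j, i < j → j ≤ nn → pvWnd u nn j ≤ pvWnd u nn pos) →
    0 ≤ pvLoopA u nn i pos ∧ pvLoopA u nn i pos ≤ nn ∧
    ∀ j, 0 ≤ j → j ≤ nn → pvWnd u nn j ≤ pvWnd u nn (pvLoopA u nn i pos) := by
  intro k
  induction k with
  | zero =>
      intro i pos hk hip hp0 hpn hinv
      have hi : ¬ 0 ≤ i := by omega
      rw [pvLoopA, dif_neg hi]
      exact ⟨hp0, hpn, fun j hj0 hjn => hinv j (by omega) hjn⟩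
  | succ k ih =>
      intro i pos hk hip hp0 hpn hinv
      by_cases hi : 0 ≤ i
      · rw [pvLoopA, dif_pos hi]
        split
        next hgt =>
          have hgt' : pvWnd u nn pos < pvWnd u nn i := hgt
          refine ih (i - 1) i (by omega) (by omega) hi (by omega) ?_
          intro j hj1 hj2
          rcases eq_or_lt_of_le (show i ≤ j by omega) with h | h
          · subst h; exact le_refl _
          · exact le_trans (hinv j h hj2) (le_of_lt hgt')
        next hgt =>
          have hge : pvWnd u nn i ≤ pvWnd u nn pos := le_of_not_gt hgt
          refine ih (i - 1) pos (by omega) (by omega) hp0 hpn ?_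
          intro j hj1 hj2
          rcases eq_or_lt_of_le (show i ≤ j by omega) with h | h
          · subst h; exact hge
          · exact hinv j h hj2
      · rw [pvLoopA, dif_neg hi]
        exact ⟨hp0, hpn, fun j hj0 hjn => hinv j (by omega) hjn⟩

-- pvChar agrees with the window's k-th character
lemma pvChar_eq (u : List Char) (nn i k : Int) (hn : 0 ≤ nn) (hi : 0 ≤ i) (hk : 0 ≤ k)
    (hkn : k < nn) (hlim : i + k < (u.length : Int)) :
    ∃ (h1 : k.toNat < (pvWnd u nn i).length) (h2 : i.toNat + k.toNat < u.length),
      pvChar u i k = (pvWnd u nn i)[k.toNat]'h1 ∧ (pvWnd u nn i)[k.toNat]'h1 = u[i.toNat + k.toNat]'h2 := by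
  have h2 : i.toNat + k.toNat < u.length := by omega
  have h1 : k.toNat < (pvWnd u nn i).length := by
    rw [pvWnd_len u nn i hn hi]; omega
  refine ⟨h1, h2, ?_, pvWnd_get u nn i hn hi k.toNat h1 h2⟩
  unfold pvChar
  rw [PySem.List.pyGet?_eq_some_getElem u (by omega) (by exact_mod_cast hlim)]
  simp only [Option.getD_some]
  rw [pvWnd_get u nn i hn hi k.toNat h1 h2]
  congr 1
  omega

-- invariant proof for B's refinement loop
lemma pvRefine_spec (u : List Char) (n : Int) (hn : 1 ≤ n) :
    ∀ (fuel : Nat) (k : Int) (cands : List Int), 0 ≤ k → k + fuel = n →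
    cands ≠ [] →
    (∀ i ∈ cands, 0 ≤ i ∧ i ≤ n) →
    (∀ i ∈ cands, k.toNat ≤ (pvWnd u n i).length) →
    (∀ i ∈ cands, ∀ j ∈ cands, (pvWnd u n i).take k.toNat = (pvWnd u n j).take k.toNat) →
    (∀ j, 0 ≤ j → j ≤ n → j ∉ cands → ∀ i ∈ cands, pvWnd u n j ≤ pvWnd u n i) →
    (pvRefine u (u.length : Int) fuel k cands ≠ [] ∧
     (∀ i ∈ pvRefine u (u.length : Int) fuel k cands, 0 ≤ i ∧ i ≤ n) ∧
     ∀ j, 0 ≤ j → j ≤ n →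
       pvWnd u n j ≤ pvWnd u n ((pvRefine u (u.length : Int) fuel k cands).headD 0)) := by
  intro fuel
  induction fuel with
  | zero =>
      intro k cands hk0 hkn hne hbnd hlen hpre hout
      have hkeq : k = n := by push_cast at hkn; omega
      subst hkeq
      obtain ⟨c, cs, rfl⟩ := List.exists_cons_of_ne_nil hne
      have hc : c ∈ c :: cs := List.mem_cons_self
      have heq : ∀ i ∈ c :: cs, pvWnd u k i = pvWnd u k c := by
        intro i hi
        have h1 : (pvWnd u k i).take k.toNat = pvWnd u k i := by
          apply List.take_of_length_le
          rw [pvWnd_len u k i (by omega) (hbnd i hi).1]; omega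
        have h2 : (pvWnd u k c).take k.toNat = pvWnd u k c := by
          apply List.take_of_length_le
          rw [pvWnd_len u k c (by omega) (hbnd c hc).1]; omega
        rw [← h1, ← h2]
        exact hpre i hi c hc
      refine ⟨hne, hbnd, ?_⟩
      intro j hj0 hjn
      simp only [pvRefine, List.headD_cons]
      by_cases hjc : j ∈ c :: cs
      · rw [heq j hjc]
      · exact hout j hj0 hjn hjc c hc
  | succ fuel ih =>
      intro k cands hk0 hkn hne hbnd hlen hpre hout
      have hkltn : k < n := by push_cast at hkn; omega
      simp only [pvRefine]
      by_cases hae : (cands.filter (fun i => decide (i + k < (u.length : Int)))).isEmpty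
      · rw [if_pos hae]
        have hal : cands.filter (fun i => decide (i + k < (u.length : Int))) = [] :=
          List.isEmpty_iff.mp hae
        have hdead : ∀ i ∈ cands, ¬ (i + k < (u.length : Int)) := by
          intro i hi hlt
          have : i ∈ cands.filter (fun i => decide (i + k < (u.length : Int))) :=
            List.mem_filter.mpr ⟨hi, by simpa using hlt⟩
          rw [hal] at this
          simp at this
        obtain ⟨c, cs, rfl⟩ := List.exists_cons_of_ne_nil hne
        have hc : c ∈ c :: cs := List.mem_cons_self
        have heq : ∀ i ∈ c :: cs, pvWnd u n i = pvWnd u n c := by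
          intro i hi
          have h1 : (pvWnd u n i).take k.toNat = pvWnd u n i := by
            apply List.take_of_length_le
            rw [pvWnd_len u n i (by omega) (hbnd i hi).1]
            have := hdead i hi
            omega
          have h2 : (pvWnd u n c).take k.toNat = pvWnd u n c := by
            apply List.take_of_length_le
            rw [pvWnd_len u n c (by omega) (hbnd c hc).1]
            have := hdead c hc
            omega
          rw [← h1, ← h2]
          exact hpre i hi c hc
        refine ⟨hne, hbnd, ?_⟩
        intro j hj0 hjn
        simp only [List.headD_cons]
        by_cases hjc : j ∈ c :: cs
        · rw [heq j hjc]
        · exact hout j hj0 hjn hjc c hc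
      · rw [if_neg hae]
        have haneq : cands.filter (fun i => decide (i + k < (u.length : Int))) ≠ [] := by
          intro h; rw [h] at hae; simp at hae
        have halive : ∀ i, i ∈ cands.filter (fun i => decide (i + k < (u.length : Int))) ↔
            i ∈ cands ∧ i + k < (u.length : Int) := by
          intro i; rw [List.mem_filter]; simp
        cases hmax : PySem.List.max?
            ((cands.filter (fun i => decide (i + k < (u.length : Int)))).map (fun i => pvChar u i k))
            (fun c => c) with
        | none =>
            exfalso
            rw [PySem.List.max?_eq_none_iff, List.map_eq_nil_iff] at hmax
            exact haneq hmax
        | some m =>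
            have hmem := PySem.List.max?_mem hmax
            have hismax := PySem.List.max?_isMax hmax
            obtain ⟨i0, hi0a, hi0⟩ := List.mem_map.mp hmem
            simp only [Option.getD_some]
            -- facts about the refined candidate list
            have hc' : ∀ i, i ∈ (cands.filter (fun i => decide (i + k < (u.length : Int)))).filter
                (fun i => pvChar u i k == m) ↔
                (i ∈ cands ∧ i + k < (u.length : Int)) ∧ pvChar u i k = m := by
              intro i
              rw [List.mem_filter, halive]
              simp
            have hchar : ∀ i ∈ cands, i + k < (u.length : Int) →
                ∃ (h1 : k.toNat < (pvWnd u n i).length),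
                  pvChar u i k = (pvWnd u n i)[k.toNat]'h1 := by
              intro i hi hlim
              obtain ⟨h1, h2, he1, he2⟩ := pvChar_eq u n i k (by omega) (hbnd i hi).1 hk0 hkltn hlim
              exact ⟨h1, he1⟩
            apply ih (k + 1)
            · omega
            · push_cast at hkn ⊢; omega
            · apply List.ne_nil_of_mem (a := i0)
              rw [hc']
              exact ⟨(halive i0).mp hi0a, hi0⟩
            · intro i hi
              exact hbnd i ((hc' i).mp hi).1.1
            · intro i hi
              obtain ⟨⟨hic, hil⟩, _⟩ := (hc' i).mp hi
              have hi0' := (hbnd i hic).1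
              have h9 : i.toNat + k.toNat < u.length := by omega
              rw [pvWnd_len u n i (by omega) (hbnd i hic).1]
              omega
            · intro i hi j hj
              obtain ⟨⟨hic, hil⟩, hiv⟩ := (hc' i).mp hi
              obtain ⟨⟨hjc, hjl⟩, hjv⟩ := (hc' j).mp hj
              obtain ⟨hi1, hie⟩ := hchar i hic hil
              obtain ⟨hj1, hje⟩ := hchar j hjc hjl
              have hk1 : (k + 1).toNat = k.toNat + 1 := by omega
              rw [hk1, List.take_add_one, List.take_add_one,
                  List.getElem?_eq_getElem hi1, List.getElem?_eq_getElem hj1]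
              rw [hpre i hic j hjc]
              rw [← hie, ← hje, hiv, hjv]
            · intro j hj0 hjn hjc' i hi
              obtain ⟨⟨hic, hil⟩, hiv⟩ := (hc' i).mp hi
              obtain ⟨hi1, hie⟩ := hchar i hic hil
              by_cases hjcand : j ∈ cands
              · by_cases hjal : j + k < (u.length : Int)
                · -- j alive but its k-th character is not maximal
                  obtain ⟨hj1, hje⟩ := hchar j hjcand hjal
                  have hjle : pvChar u j k ≤ m := by
                    apply hismax
                    exact List.mem_map.mpr ⟨j, (halive j).mpr ⟨hjcand, hjal⟩, rfl⟩
                  have hjne : pvChar u j k ≠ m := by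
                    intro h
                    exact hjc' ((hc' j).mpr ⟨⟨hjcand, hjal⟩, h⟩)
                  have hlt : (pvWnd u n j)[k.toNat]'hj1 < (pvWnd u n i)[k.toNat]'hi1 := by
                    rw [← hie, ← hje, hiv]
                    exact lt_of_le_of_ne hjle hjne
                  exact le_of_lt (pvLex_get k.toNat _ _ (hpre j hjcand i hic) hj1 hi1 hlt)
                · -- j's window has exactly k characters: a strict prefix of i's window
                  have hjlen : (pvWnd u n j).length = k.toNat := by
                    have h1 := hlen j hjcand
                    rw [pvWnd_len u n j (by omega) hj0] at h1 ⊢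
                    omega
                  have hjfull : (pvWnd u n j).take k.toNat = pvWnd u n j :=
                    List.take_of_length_le (by omega)
                  have : pvWnd u n j = (pvWnd u n i).take k.toNat := by
                    rw [← hjfull]
                    exact hpre j hjcand i hic
                  rw [this]
                  exact le_of_lt (pvLex_prefix k.toNat _ hi1)
              · exact hout j hj0 hjn hjcand i hic

lemma pvMain (binary_string : String) (n : Int) :
    compute_max_binary_number binary_string n = compute_max_binary_number_alt binary_string n := by
  simp only [compute_max_binary_number, compute_max_binary_number_alt,
    PySem.List.slice_zero_start, PySem.List.slice_none_none]
  set u := binary_string.toList ++ binary_string.toList with hu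
  have hfn : (fun (d : Int) (bit : Char) =>
        PySem.Int.mod ((d <<< (1 : Nat)) + ((bit.toNat : Int) - ('0'.toNat : Int))) pvMOD)
      = (fun (v : Int) (bit : Char) => PySem.Int.mod (v * 2 + (bit.toNat : Int) - 48) pvMOD) := by
    funext d c
    congr 1
    rw [Int.shiftLeft_eq]
    have h0 : ('0'.toNat : Int) = 48 := by decide
    rw [h0]
    ring
  by_cases hn : n ≤ 0
  · rw [if_pos hn]
    have hloop : pvLoopA u n (n - 1) n = n := by
      rw [pvLoopA, dif_neg (by omega : ¬ (0 : Int) ≤ n - 1)]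
    rw [hloop]
    have hempty : PySem.List.slice u (some n) (some (n + n)) = [] := by
      rcases lt_or_eq_of_le hn with h | h
      · have : (PySem.List.slice u (some n) (some (n + n))).length = 0 := by
          rw [PySem.List.length_slice]
          unfold PySem.List.clampIdx
          split_ifs <;> omega
        exact List.eq_nil_of_length_eq_zero this
      · subst h
        rw [PySem.List.slice_toNat u (le_refl 0) (by omega)]
        simp
    rw [hempty]
    simp
  · rw [if_neg hn]
    have hn1 : (1 : Int) ≤ n := by omega
    obtain ⟨hp0, hpn, hpmax⟩ := pvLoopA_spec u n n.toNat (n - 1) n (by omega) (by omega)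
      (by omega) (le_refl n)
      (by intro j h1 h2
          have : j = n := by omega
          subst this
          exact le_refl _)
    have h0mem : (0 : Int) ∈ PySem.List.pyRange 0 (n + 1) 1 :=
      PySem.List.mem_pyRange_one.mpr ⟨le_refl 0, by omega⟩
    obtain ⟨hrne, hrbnd, hrmax⟩ := pvRefine_spec u n hn1 n.toNat 0
      (PySem.List.pyRange 0 (n + 1) 1) (le_refl 0) (by omega)
      (List.ne_nil_of_mem h0mem)
      (by intro i hi
          have := PySem.List.mem_pyRange_one.mp hi
          omega)
      (by intro i hi; simp)
      (by intro i _ j _; simp)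
      (by intro j hj0 hjn hjc i hic
          exact absurd (PySem.List.mem_pyRange_one.mpr ⟨hj0, by omega⟩) hjc)
    set r := pvRefine u (u.length : Int) n.toNat 0 (PySem.List.pyRange 0 (n + 1) 1) with hr
    have hc0mem : r.headD 0 ∈ r := by
      cases hr' : r with
      | nil => exact absurd hr' hrne
      | cons a t => simp
    have hc0 := hrbnd (r.headD 0) hc0mem
    have hwe : pvWnd u n (pvLoopA u n (n - 1) n) = pvWnd u n (r.headD 0) :=
      le_antisymm (hrmax _ hp0 hpn) (hpmax (r.headD 0) hc0.1 hc0.2)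
    unfold pvWnd at hwe
    rw [hwe, hfn]

-- ===== VERDICT (by name: the statement is the Claim_ definition above) =====
theorem compute_max_binary_number_spec : Claim_equal_compute_max_binary_number := by
  intro binary_string n _
  exact pvMain binary_string n
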